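-- pv_equiv track=rewrite | github.com/guswns7452/coding_test | Algorithm_study/DFS/08_14/Travling Route.py | dfs_recursive
-- ===== SOURCE A (Python) =====
-- import copy
--
-- def dfs_recursive(graph, current, route, count):
--     # 모든 경로를 다 탐색한 경우
--     if len(route) == count + 1:
--         return route
--
--     # 현재 노드에서 갈 수 있는 다음 목적지들을 탐색
--     if current in graph:
--         next_nodes = sorted(graph[current])  # 알파벳 순서로 정렬
--         for i, next_node in enumerate(next_nodes):
--             # 다음 목적지를 선택했으므로 해당 목적지를 제거
--             graph_copy = copy.deepcopy(graph)
--             graph_copy[current].pop(i)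
--             result = dfs_recursive(graph_copy, next_node, route + [next_node], count)
--             if result:  # 유효한 경로를 찾은 경우
--                 return result
--
--     return None  # 유효한 경로를 찾지 못한 경우
-- ===== SOURCE B (Python) =====
-- def dfs_recursive(graph, current, route, count):
--     # Iterative DFS over an explicit stack of (graph, node, route) frames.
--     # Each branch copies only the dict spine and rebuilds the one entry it
--     # shortens (copy-on-write), so the per-branch cost is the dict size plus
--     # one list, not a deep copy of every adjacency list.
--     stack = [(graph, current, route)]
--     while stack:
--         g, cur, rt = stack.pop()
--         if len(rt) == count + 1:
--             return rt
--         if cur in g: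
--             adj = g[cur]
--             branches = []
--             for i, nxt in enumerate(sorted(adj)):
--                 g2 = dict(g)
--                 g2[cur] = adj[:i] + adj[i + 1:]
--                 branches.append((g2, nxt, rt + [nxt]))
--             stack.extend(reversed(branches))
--     return None
-- ===== Notes on version B (the rewrite author's own statement) =====
-- stated objective: faster
-- what changed: B replaces A's recursion-with-deepcopy by an iterative DFS over an explicit stack of frames, and each branch shallow-copies only the dict spine and rebuilds the single shortened entry (copy-on-write) instead of deep-copying every adjacency list.
import Mathlib
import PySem

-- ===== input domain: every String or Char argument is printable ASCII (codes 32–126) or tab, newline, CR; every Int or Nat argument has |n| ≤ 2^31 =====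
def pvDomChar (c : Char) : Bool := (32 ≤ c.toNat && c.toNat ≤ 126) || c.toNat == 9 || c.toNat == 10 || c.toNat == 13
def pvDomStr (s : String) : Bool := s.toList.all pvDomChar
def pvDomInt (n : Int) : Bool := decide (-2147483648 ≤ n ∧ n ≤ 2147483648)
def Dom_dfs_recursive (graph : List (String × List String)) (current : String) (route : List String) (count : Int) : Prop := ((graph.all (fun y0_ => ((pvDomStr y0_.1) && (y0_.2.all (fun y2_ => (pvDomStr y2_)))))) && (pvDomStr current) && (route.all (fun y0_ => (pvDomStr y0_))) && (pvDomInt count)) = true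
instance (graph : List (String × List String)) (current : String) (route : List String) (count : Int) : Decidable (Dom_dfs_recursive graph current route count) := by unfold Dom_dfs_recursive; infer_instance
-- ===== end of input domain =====

-- B replaces A's recursion-with-deepcopy by an iterative DFS over an explicit stack whose
-- branches copy only the dict spine and rebuild the one shortened entry (copy-on-write),
-- avoiding the deep copy of the whole graph per explored edge (objective: speed).

-- Shared plumbing of the dict-as-association-list convention (unique keys: the values the
-- tester produces come from Python dicts). pvLookup = `k in d` / `d[k]` (first match);
-- pvSetEntry = `d2 = dict(d); d2[k] = v` for a key already present (replace in place).
def pvLookup : List (String × List String) → String → Option (List String)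
  | [], _ => none
  | (k, v) :: rest, c => if k == c then some v else pvLookup rest c

def pvSetEntry (g : List (String × List String)) (c : String) (v : List String) : List (String × List String) :=
  g.map (fun p => if p.1 == c then (c, v) else p)

-- Python truthiness of `if result:` — None and the empty list are falsy.
def pvTruthy (r : Option (List String)) : Bool :=
  match r with
  | some l => !l.isEmpty
  | none => false

-- Totality fuel: each recursive level / pushed frame removes one edge, so the total number
-- of edges (+1) bounds the depth; the fuel is a totality guard only, never exhausted.
def pvFuel (graph : List (String × List String)) : Nat :=
  (graph.map (fun p => p.2.length)).sum + 1

-- ===== PORT A =====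
mutual
-- body of A: deepcopy the graph, pop the i-th slot of graph_copy[current], recurse
def pvDfsA (f : Nat) (graph : List (String × List String)) (current : String)
    (route : List String) (count : Int) : Option (List String) :=
  if (route.length : Int) = count + 1 then some route
  else
    match f with
    | 0 => none          -- fuel guard, never reached (see pvFuel)
    | Nat.succ f' =>
      -- `if current in graph: next_nodes = sorted(graph[current])`
      match pvLookup graph current with
      | some adj =>
          pvLoopA f' graph current route count adj
            (PySem.List.enumerate (PySem.List.sorted adj (fun x => x) false) 0)
      | none => none
termination_by (f, 0)
-- `for i, next_node in enumerate(next_nodes): …`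
def pvLoopA : Nat → List (String × List String) → String → List String → Int →
    List String → List (Int × String) → Option (List String)
  | _, _, _, _, _, _, [] => none
  | f', graph, current, route, count, adj, (i, next_node) :: rest =>
    -- graph_copy = deepcopy(graph); graph_copy[current].pop(i)
    match PySem.List.pop? adj i with
    | none => none       -- unreachable: i < len(adj) (= len(next_nodes)); Python never raises here
    | some (_, popped) =>
      let graph_copy := pvSetEntry graph current popped
      let result := pvDfsA f' graph_copy next_node (route ++ [next_node]) count
      if pvTruthy result then result
      else pvLoopA f' graph current route count adj rest
termination_by f' _ _ _ _ _ l => (f', l.length + 1)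
end

def dfs_recursive (graph : List (String × List String)) (current : String) (route : List String) (count : Int) : Option (List String) :=
  pvDfsA (pvFuel graph) graph current route count

-- ===== PORT B =====
-- B's `while stack:` loop. A frame is (fuel, graph, node, route); the list's head is the
-- top of Python's stack, so `stack.extend(reversed(branches))` + `stack.pop()` is
-- `branches ++ rest`. K and the per-frame fuel are totality guards only (never reached:
-- K bounds every adjacency-list length, see pvFuel).
def pvLoopB (K : Nat) (count : Int) :
    List (Nat × List (String × List String) × String × List String) → Option (List String)
  | [] => none
  | (f, g, cur, rt) :: rest =>
    if (rt.length : Int) = count + 1 then some rt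
    else
      match f with
      | 0 => pvLoopB K count rest          -- fuel guard, never reached (see pvFuel)
      | Nat.succ f' =>
        match pvLookup g cur with
        | none => pvLoopB K count rest     -- `cur in g` is false: nothing to push
        | some adj =>
          let srt := PySem.List.sorted adj (fun x => x) false
          if h : srt.length ≤ K then
            -- `for i, nxt in enumerate(sorted(adj)): g2 = dict(g); g2[cur] = adj[:i] + adj[i+1:]`
            pvLoopB K count ((srt.zipIdx.map (fun p =>
              (f', pvSetEntry g cur
                    (PySem.List.slice adj none (some (p.2 : Int)) ++
                     PySem.List.slice adj (some ((p.2 : Int) + 1)) none),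
               p.1, rt ++ [p.1]))) ++ rest)
          else pvLoopB K count rest        -- bound guard, never reached
termination_by stack => (stack.map (fun fr => (K + 1) ^ fr.1)).sum
decreasing_by
  all_goals first
  | (simp only [List.map_cons, List.sum_cons]
     exact Nat.lt_add_of_pos_left (pow_pos (Nat.succ_pos K) _))
  | (simp only [List.map_cons, List.map_append, List.sum_append, List.sum_cons, List.map_map]
     have hconst : ∀ (l : List (String × Nat)),
         (l.map (fun _ : String × Nat => (K + 1) ^ f')).sum = l.length * (K + 1) ^ f' := by
       intro l
       induction l with
       | nil => simp
       | cons a t ih => simp only [List.map_cons, List.sum_cons, List.length_cons, ih, Nat.succ_mul]; omega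
     have hp : 0 < (K + 1) ^ f' := pow_pos (Nat.succ_pos K) f'
     have h1 : srt.zipIdx.length ≤ K := by simpa using h
     have hstep : (srt.zipIdx.map (fun _ : String × Nat => (K + 1) ^ f')).sum < (K + 1) ^ (f' + 1) := by
       rw [hconst, pow_succ]
       calc srt.zipIdx.length * (K + 1) ^ f' ≤ K * (K + 1) ^ f' := Nat.mul_le_mul_right _ h1
         _ < (K + 1) ^ f' * (K + 1) := by
             rw [Nat.mul_comm]
             exact (Nat.mul_lt_mul_left hp).mpr (Nat.lt_succ_self K)
     exact Nat.add_lt_add_right hstep _)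

def dfs_recursive_alt (graph : List (String × List String)) (current : String) (route : List String) (count : Int) : Option (List String) :=
  pvLoopB (pvFuel graph) count [(pvFuel graph, graph, current, route)]

-- ===== PRECONDITION & SPEC =====
def Spec_dfs_recursive (graph : List (String × List String)) (current : String) (route : List String) (count : Int) (out : Option (List String)) : Prop := out = dfs_recursive_alt graph current route count
instance (graph : List (String × List String)) (current : String) (route : List String) (count : Int) (out : Option (List String)) : Decidable (Spec_dfs_recursive graph current route count out) := by unfold Spec_dfs_recursive; infer_instance

-- ===== CLAIM =====
def Claim_equal_dfs_recursive : Prop := ∀ (graph : List (String × List String)) (current : String) (route : List String) (count : Int), Dom_dfs_recursive graph current route count → Spec_dfs_recursive graph current route count (dfs_recursive graph current route count)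

-- ===== LEMMAS AND PROOFS =====

-- every adjacency list of the graph is shorter than K (true for K = pvFuel graph,
-- preserved by the branch updates); it discharges B's two totality guards in the proof
def pvInv (K : Nat) (g : List (String × List String)) : Prop :=
  ∀ p ∈ g, p.2.length < K

theorem pvLookup_some_mem {g : List (String × List String)} {c : String} {adj : List String}
    (h : pvLookup g c = some adj) : ∃ k, (k, adj) ∈ g := by
  induction g with
  | nil => simp [pvLookup] at h
  | cons p rest ih =>
    obtain ⟨k, v⟩ := p
    by_cases hk : (k == c) = true
    · simp [pvLookup, hk] at h
      exact ⟨k, by simp [h]⟩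
    · simp [pvLookup, hk] at h
      obtain ⟨k', hm⟩ := ih h
      exact ⟨k', List.mem_cons_of_mem _ hm⟩

theorem pvInv_lookup {K : Nat} {g : List (String × List String)} {c : String} {adj : List String}
    (hI : pvInv K g) (h : pvLookup g c = some adj) : adj.length < K := by
  obtain ⟨k, hm⟩ := pvLookup_some_mem h
  exact hI (k, adj) hm

theorem pvInv_setEntry {K : Nat} {g : List (String × List String)} {c : String} {v : List String}
    (hI : pvInv K g) (hv : v.length < K) : pvInv K (pvSetEntry g c v) := by
  intro p hp
  unfold pvSetEntry at hp
  obtain ⟨q, hq, hpq⟩ := List.mem_map.1 hp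
  by_cases hc : (q.1 == c) = true
  · simp [hc] at hpq; subst hpq; exact hv
  · simp [hc] at hpq; subst hpq; exact hI q hq

-- A's loop only returns a result that passed the `if result:` truthiness test
theorem pvLoopA_ne_nil : ∀ (choices : List (Int × String)) (f' : Nat)
    (g : List (String × List String)) (c : String) (r : List String) (n : Int)
    (adj : List String) (l : List String),
    pvLoopA f' g c r n adj choices = some l → l ≠ [] := by
  intro choices
  induction choices with
  | nil => intro f' g c r n adj l h; rw [pvLoopA] at h; exact absurd h (by simp)
  | cons p rest ih =>
    intro f' g c r n adj l h
    obtain ⟨i, nxt⟩ := p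
    rw [pvLoopA] at h
    cases hpop : PySem.List.pop? adj i with
    | none => rw [hpop] at h; exact absurd h (by simp)
    | some x =>
      obtain ⟨y, popped⟩ := x
      rw [hpop] at h
      simp only at h
      by_cases ht : pvTruthy (pvDfsA f' (pvSetEntry g c popped) nxt (r ++ [nxt]) n) = true
      · rw [if_pos ht] at h
        rw [h] at ht
        simpa [pvTruthy] using ht
      · rw [if_neg ht] at h
        exact ih _ _ _ _ _ _ _ h

theorem pvDfsA_some {f : Nat} {g : List (String × List String)} {c : String}
    {r : List String} {n : Int} {l : List String}
    (h : pvDfsA f g c r n = some l) : l = r ∨ l ≠ [] := by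
  rw [pvDfsA.eq_def] at h
  by_cases hb : (r.length : Int) = n + 1
  · rw [if_pos hb] at h; exact Or.inl (by injection h with h; exact h.symm)
  · rw [if_neg hb] at h
    match f with
    | 0 => exact absurd h (by simp)
    | Nat.succ f' =>
      cases hlk : pvLookup g c with
      | none => rw [hlk] at h; exact absurd h (by simp)
      | some adj =>
        rw [hlk] at h
        exact Or.inr (pvLoopA_ne_nil _ _ _ _ _ _ _ _ h)

-- the frame correspondence: one stack frame of B behaves as one recursive call of A,
-- with the rest of the stack as the failure continuation
theorem pvFrame (K : Nat) (count : Int) :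
    ∀ (f : Nat) (g : List (String × List String)) (c : String) (r : List String)
      (rest : List (Nat × List (String × List String) × String × List String)),
      pvInv K g →
      pvLoopB K count ((f, g, c, r) :: rest) =
        (match pvDfsA f g c r count with
         | some l => some l
         | none => pvLoopB K count rest) := by
  intro f
  induction f with
  | zero =>
    intro g c r rest hI
    rw [pvLoopB, pvDfsA]
    by_cases hb : (r.length : Int) = count + 1
    · simp [hb]
    · simp [hb]
  | succ f' ihf =>
    intro g c r rest hI
    rw [pvLoopB, pvDfsA]
    by_cases hb : (r.length : Int) = count + 1
    · simp [hb]
    · rw [if_neg hb, if_neg hb]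
      cases hlk : pvLookup g c with
      | none => simp
      | some adj =>
        simp only
        have hadjK : adj.length < K := pvInv_lookup hI hlk
        have hsrtlen : (PySem.List.sorted adj (fun x => x) false).length = adj.length :=
          PySem.List.length_sorted _ _ _
        rw [dif_pos (by rw [hsrtlen]; exact le_of_lt hadjK)]
        have main : ∀ (srt : List String) (s : Nat),
            s + srt.length = adj.length →
            pvLoopB K count ((srt.zipIdx s |>.map (fun p =>
              (f', pvSetEntry g c
                    (PySem.List.slice adj none (some (p.2 : Int)) ++
                     PySem.List.slice adj (some ((p.2 : Int) + 1)) none),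
               p.1, r ++ [p.1]))) ++ rest) =
              (match pvLoopA f' g c r count adj (PySem.List.enumerate srt (s : Int)) with
               | some l => some l
               | none => pvLoopB K count rest) := by
          intro srt
          induction srt with
          | nil => intro s hs; simp [PySem.List.enumerate, pvLoopA]
          | cons nxt stail ihs =>
            intro s hs
            have hslt : s < adj.length := by simp at hs; omega
            rw [PySem.List.enumerate_cons, pvLoopA, PySem.List.pop?_natCast adj s hslt]
            simp only [List.zipIdx_cons, List.map_cons, List.cons_append]
            have hslice : PySem.List.slice adj none (some (s : Int)) ++
                PySem.List.slice adj (some ((s : Int) + 1)) none = adj.eraseIdx s := by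
              have h1 : PySem.List.slice adj none (some (s : Int)) = adj.take s :=
                PySem.List.slice_to_natCast adj s
              have hc : ((s : Int) + 1) = ((s + 1 : Nat) : Int) := by push_cast; ring
              have h2 : PySem.List.slice adj (some ((s : Int) + 1)) none = adj.drop (s + 1) := by
                rw [hc]; exact PySem.List.slice_from_natCast adj (s + 1)
              rw [h1, h2, List.eraseIdx_eq_take_drop_succ]
            rw [hslice]
            have hI2 : pvInv K (pvSetEntry g c (adj.eraseIdx s)) :=
              pvInv_setEntry hI (lt_of_le_of_lt (List.length_eraseIdx_le _ _) hadjK)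
            rw [ihf (pvSetEntry g c (adj.eraseIdx s)) nxt (r ++ [nxt]) _ hI2]
            cases hres : pvDfsA f' (pvSetEntry g c (adj.eraseIdx s)) nxt (r ++ [nxt]) count with
            | some l =>
              have hne : l ≠ [] := by
                rcases pvDfsA_some hres with h | h
                · subst h; simp
                · exact h
              have ht : pvTruthy (some l) = true := by
                simp [pvTruthy, hne]
              simp only [ht, if_pos]
            | none =>
              simp only [pvTruthy, Bool.false_eq_true]
              rw [if_neg (by simp)]
              have hcast : ((s : Int) + 1) = ((s + 1 : Nat) : Int) := by push_cast; ring
              rw [hcast]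
              exact ihs (s + 1) (by simp at hs ⊢; omega)
        simpa using main (PySem.List.sorted adj (fun x => x) false) 0 (by simp [hsrtlen])

theorem pvInv_init (graph : List (String × List String)) : pvInv (pvFuel graph) graph := by
  intro p hp
  have : p.2.length ≤ (graph.map (fun q => q.2.length)).sum :=
    List.single_le_sum (fun x _ => Nat.zero_le x) _ (List.mem_map_of_mem hp)
  unfold pvFuel
  omega


-- ===== VERDICT =====
theorem dfs_recursive_spec : Claim_equal_dfs_recursive := by
  intro graph current route count _
  unfold Spec_dfs_recursive dfs_recursive dfs_recursive_alt
  rw [pvFrame (pvFuel graph) count (pvFuel graph) graph current route [] (pvInv_init graph)]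
  cases h : pvDfsA (pvFuel graph) graph current route count with
  | some l => rfl
  | none => rw [pvLoopB]
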